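-- pv_equiv track=rewrite | github.com/crwilcox/advent-of-code | 2023/day14/day14.py | tilt_row_west
-- ===== SOURCE A (Python) =====
-- ROUNDROCK = "O"
--
-- CUBEDROCK = "#"
--
-- def tilt_row_west(row) -> tuple[str]:
--     new_row = ""
--     for row_idx, val in enumerate(row):
--         if val == ROUNDROCK:
--             new_row += ROUNDROCK
--         if val == CUBEDROCK:
--             empty_squares = row_idx - len(new_row)
--             for _ in range(empty_squares):
--                 new_row += "."
--             new_row += CUBEDROCK
--     while len(new_row) != len(row):
--         new_row += "."
--     return new_row
-- ===== SOURCE B (Python) =====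
-- def tilt_row_west(row) -> tuple[str]:
--     segments = row.split("#")
--     tilted = []
--     for s in segments:
--         c = s.count("O")
--         tilted.append("O" * c + "." * (len(s) - c))
--     return "#".join(tilted)
-- ===== Notes on version B (the rewrite author's own statement) =====
-- stated objective: simpler
-- what changed: B splits the row on '#' and rebuilds each gap-free segment as 'O'*count + '.'*rest then joins with '#', replacing A's running-index/length bookkeeping and end-padding loop.
import Mathlib
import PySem

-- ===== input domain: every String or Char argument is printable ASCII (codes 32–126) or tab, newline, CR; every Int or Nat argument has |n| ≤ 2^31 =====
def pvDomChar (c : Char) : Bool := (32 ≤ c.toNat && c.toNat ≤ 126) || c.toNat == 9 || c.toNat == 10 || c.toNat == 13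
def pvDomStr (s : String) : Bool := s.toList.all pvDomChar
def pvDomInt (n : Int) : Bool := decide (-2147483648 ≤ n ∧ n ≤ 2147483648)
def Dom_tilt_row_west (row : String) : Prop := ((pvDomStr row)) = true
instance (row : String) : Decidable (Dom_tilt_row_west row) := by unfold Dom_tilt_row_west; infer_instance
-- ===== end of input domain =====

-- B replaces A's index/length bookkeeping with split('#') / per-segment counting / '#'.join — a different decomposition (objective: simpler).

-- ===== PORT A =====
-- the for-loop over enumerate(row): i is the running index, acc is new_row.
-- The inner `for _ in range(empty_squares)` of single-dot appends is ported as appending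
-- List.replicate (i - acc.length) '.' (Python's range of a non-positive count is empty,
-- as is Nat truncated subtraction there), and likewise the trailing padding while-loop
-- (its guard len(new_row) != len(row) is only ever reached with len(new_row) ≤ len(row)).
def tiltLoopA (i : Nat) (t : List Char) (acc : List Char) : List Char :=
  match t with
  | [] => acc
  | v :: t' =>
    let acc1 := if v = 'O' then acc ++ ['O'] else acc
    let acc2 := if v = '#' then (acc1 ++ List.replicate (i - acc1.length) '.') ++ ['#'] else acc1
    tiltLoopA (i + 1) t' acc2

def tilt_row_west (row : String) : String :=
  let new := tiltLoopA 0 row.toList []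
  String.mk (new ++ List.replicate (row.toList.length - new.length) '.')

-- ===== PORT B =====
-- row.split('#') → List.splitOn '#'; s.count("O") → List.count; "#".join(...) → List.intercalate ['#']
def tiltSeg (s : List Char) : List Char :=
  let c := s.count 'O'
  List.replicate c 'O' ++ List.replicate (s.length - c) '.'

def tilt_row_west_alt (row : String) : String :=
  String.mk (List.intercalate ['#'] ((row.toList.splitOn '#').map tiltSeg))

-- ===== PRECONDITION & SPEC =====
def Spec_tilt_row_west (row : String) (out : String) : Prop := out = tilt_row_west_alt row
instance (row : String) (out : String) : Decidable (Spec_tilt_row_west row out) := by unfold Spec_tilt_row_west; infer_instance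

-- ===== CLAIM (what is proved, stated in full; the proofs are below) =====
def Claim_equal_tilt_row_west : Prop := ∀ (row : String), Dom_tilt_row_west row → Spec_tilt_row_west row (tilt_row_west row)

-- ===== LEMMAS AND PROOFS =====

-- B's whole output, over char lists
def tiltB (t : List Char) : List Char :=
  List.intercalate ['#'] ((t.splitOn '#').map tiltSeg)

theorem tiltLoopA_append (s t : List Char) : ∀ (i : Nat) (acc : List Char),
    tiltLoopA i (s ++ t) acc = tiltLoopA (i + s.length) t (tiltLoopA i s acc) := by
  induction s with
  | nil => intro i acc; simp [tiltLoopA]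
  | cons v s ih =>
    intro i acc
    simp only [List.cons_append, tiltLoopA, ih, List.length_cons]
    ring_nf

theorem tiltLoopA_no_sep (s : List Char) (hs : '#' ∉ s) : ∀ (i : Nat) (acc : List Char),
    tiltLoopA i s acc = acc ++ List.replicate (s.count 'O') 'O' := by
  induction s with
  | nil => intro i acc; simp [tiltLoopA]
  | cons v s ih =>
    intro i acc
    have hv : v ≠ '#' := fun h => hs (h ▸ List.mem_cons_self ..)
    have hs' : '#' ∉ s := fun h => hs (List.mem_cons_of_mem _ h)
    by_cases hO : v = 'O'
    · subst hO
      simp [tiltLoopA, hv, ih hs', List.replicate_succ, List.append_assoc]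
    · simp [tiltLoopA, hv, hO, ih hs']

theorem exists_first_sep (t : List Char) (h : '#' ∈ t) :
    ∃ s t', t = s ++ '#' :: t' ∧ '#' ∉ s := by
  induction t with
  | nil => cases h
  | cons v t ih =>
    by_cases hv : v = '#'
    · exact ⟨[], t, by simp [hv], by simp⟩
    · have h' : '#' ∈ t := by
        rcases List.mem_cons.mp h with h1 | h1
        · exact absurd h1.symm hv
        · exact h1
      obtain ⟨s, t', rfl, hs⟩ := ih h'
      refine ⟨v :: s, t', rfl, ?_⟩
      intro hmem
      rcases List.mem_cons.mp hmem with e | e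
      · exact hv e.symm
      · exact hs e

theorem intercalate_cons_of_ne_nil (x : List Char) (xs : List (List Char)) (h : xs ≠ []) :
    List.intercalate ['#'] (x :: xs) = x ++ '#' :: List.intercalate ['#'] xs := by
  obtain ⟨y, ys, rfl⟩ := List.exists_cons_of_ne_nil h
  simp [List.intercalate, List.intersperse]

theorem tiltB_no_sep (t : List Char) (ht : '#' ∉ t) : tiltB t = tiltSeg t := by
  have : t.splitOn '#' = [t] := by
    rw [List.splitOn]
    exact List.splitOnP_eq_single _ _
      (fun x hx => by simp only [beq_iff_eq]; exact fun e => ht (e ▸ hx))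
  simp [tiltB, this, List.intercalate]

theorem tiltB_split (s t' : List Char) (hs : '#' ∉ s) :
    tiltB (s ++ '#' :: t') = tiltSeg s ++ '#' :: tiltB t' := by
  have h1 : (s ++ '#' :: t').splitOn '#' = s :: t'.splitOn '#' := by
    rw [List.splitOn, List.splitOn]
    exact List.splitOnP_first _ _
      (fun x hx => by simp only [beq_iff_eq]; exact fun e => hs (e ▸ hx)) '#' (by simp) t'
  have h2 : (t'.splitOn '#').map tiltSeg ≠ [] := by
    intro h
    exact List.splitOnP_ne_nil _ t'
      (by simpa [List.splitOn] using List.map_eq_nil_iff.mp h)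
  simp only [tiltB, h1, List.map_cons]
  exact intercalate_cons_of_ne_nil _ _ h2

-- main invariant: starting at offset i with |acc| = i, the loop result padded with
-- dots up to length i + |t| is acc followed by B's transform of t
theorem tiltLoopA_key : ∀ (n : Nat) (t : List Char), t.length ≤ n →
    ∀ (i : Nat) (acc : List Char), acc.length = i →
    tiltLoopA i t acc ++ List.replicate (i + t.length - (tiltLoopA i t acc).length) '.' =
      acc ++ tiltB t := by
  intro n
  induction n with
  | zero =>
    intro t ht i acc hacc
    have : t = [] := List.eq_nil_of_length_eq_zero (Nat.le_zero.mp ht)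
    subst this
    simp [tiltLoopA, tiltB_no_sep, tiltSeg, hacc]
  | succ n ih =>
    intro t ht i acc hacc
    by_cases hmem : '#' ∈ t
    · obtain ⟨s, t', rfl, hs⟩ := exists_first_sep t hmem
      have hc : s.count 'O' ≤ s.length := List.count_le_length
      have hstep : tiltLoopA i (s ++ '#' :: t') acc =
          tiltLoopA (i + s.length + 1) t' ((acc ++ tiltSeg s) ++ ['#']) := by
        rw [tiltLoopA_append]
        rw [tiltLoopA_no_sep s hs]
        simp only [tiltLoopA]
        have hO : ('#' : Char) ≠ 'O' := by decide
        simp only [if_neg hO]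
        have hlen : (acc ++ List.replicate (s.count 'O') 'O').length = i + s.count 'O' := by
          simp [hacc]
        rw [hlen]
        have : i + s.length - (i + s.count 'O') = s.length - s.count 'O' := by omega
        rw [this]
        simp [tiltSeg, List.append_assoc]
      rw [hstep]
      have hlen2 : ((acc ++ tiltSeg s) ++ ['#']).length = i + s.length + 1 := by
        simp [tiltSeg, hacc]; omega
      have ht' : t'.length ≤ n := by
        simp only [List.length_append, List.length_cons] at ht; omega
      have hkey := ih t' ht' (i + s.length + 1) ((acc ++ tiltSeg s) ++ ['#']) hlen2
      have hidx : i + (s ++ '#' :: t').length = i + s.length + 1 + t'.length := by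
        simp; omega
      rw [hidx, hkey, tiltB_split s t' hs]
      simp [List.append_assoc]
    · rw [tiltLoopA_no_sep t hmem, tiltB_no_sep t hmem]
      have hc : t.count 'O' ≤ t.length := List.count_le_length
      have hlen : (acc ++ List.replicate (t.count 'O') 'O').length = i + t.count 'O' := by
        simp [hacc]
      rw [hlen]
      have heq : i + t.length - (i + t.count 'O') = t.length - t.count 'O' := by omega
      rw [heq]
      simp [tiltSeg, List.append_assoc]

-- ===== VERDICT (by name: the statement is the Claim_ definition above) =====
theorem tilt_row_west_spec : Claim_equal_tilt_row_west := by
  intro row _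
  have h := tiltLoopA_key row.toList.length row.toList (le_refl _) 0 [] rfl
  simp only [Nat.zero_add, List.nil_append] at h
  show String.mk (tiltLoopA 0 row.toList [] ++
      List.replicate (row.toList.length - (tiltLoopA 0 row.toList []).length) '.') =
    String.mk (tiltB row.toList)
  rw [h]
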